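-- pv_equiv track=rewrite | github.com/DBitros/ai-development-workflows | ai-orchestrator/agents/planner.py | _determine_module_dependencies
-- ===== SOURCE A (Python) =====
-- from typing import Dict, List, Any, Optional
--
-- def _determine_module_dependencies(description_lower: str, module_type: str) -> List[str]:
--     """Determine module dependencies based on functionality."""
--     dependencies = ["Dependencies"]  # Always include Dependencies framework
--
--     # Platform service dependencies (only for platform/feature modules)
--     if module_type in ["platform", "feature"]:
--         if any(word in description_lower for word in ['api', 'network', 'request']):
--             dependencies.append("TMAPIClientApi")
--
--         if any(word in description_lower for word in ['session', 'auth', 'login']):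
--             dependencies.append("SessionManagerApi")
--
--         if any(word in description_lower for word in ['log', 'debug', 'error']):
--             dependencies.append("TMLoggerApi")
--
--         if any(word in description_lower for word in ['analytics', 'tracking']):
--             dependencies.append("TMAnalyticsApi")
--
--         if any(word in description_lower for word in ['config', 'feature']):
--             dependencies.append("TMConfigApi")
--
--     # UI dependencies
--     if any(word in description_lower for word in ['ui', 'view', 'swiftui']):
--         dependencies.extend(["Tangram2", "SwiftUINavigation"])
--
--     # State management dependencies
--     if any(word in description_lower for word in ['state', 'async', 'reactive']):
--         dependencies.extend(["Chassis", "Combine"])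
--
--     # Testing dependencies (for test modules)
--     if module_type == "test":
--         dependencies.extend(["Quick", "Nimble", "XCTest"])
--
--     return dependencies
-- ===== SOURCE B (Python) =====
-- from typing import List, Optional, Tuple
--
-- # One declarative rule table: (keywords or None, deps to append, allowed module types or None)
-- _DEP_RULES = [
--     (("api", "network", "request"), ["TMAPIClientApi"], ("platform", "feature")),
--     (("session", "auth", "login"), ["SessionManagerApi"], ("platform", "feature")),
--     (("log", "debug", "error"), ["TMLoggerApi"], ("platform", "feature")),
--     (("analytics", "tracking"), ["TMAnalyticsApi"], ("platform", "feature")),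
--     (("config", "feature"), ["TMConfigApi"], ("platform", "feature")),
--     (("ui", "view", "swiftui"), ["Tangram2", "SwiftUINavigation"], None),
--     (("state", "async", "reactive"), ["Chassis", "Combine"], None),
--     (None, ["Quick", "Nimble", "XCTest"], ("test",)),
-- ]
--
-- def _determine_module_dependencies(description_lower: str, module_type: str) -> List[str]:
--     deps = ["Dependencies"]
--     for words, extra, types in _DEP_RULES:
--         if types is not None and module_type not in types:
--             continue
--         if words is not None and not any(w in description_lower for w in words):
--             continue
--         deps.extend(extra)
--     return deps
-- ===== Notes on version B (the rewrite author's own statement) =====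
-- stated objective: simpler
-- what changed: Replaces nine inline if-branches by a declarative rule table (keywords, dependencies, module-type guard) traversed by one loop that appends each matching entry's dependencies.
import Mathlib
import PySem

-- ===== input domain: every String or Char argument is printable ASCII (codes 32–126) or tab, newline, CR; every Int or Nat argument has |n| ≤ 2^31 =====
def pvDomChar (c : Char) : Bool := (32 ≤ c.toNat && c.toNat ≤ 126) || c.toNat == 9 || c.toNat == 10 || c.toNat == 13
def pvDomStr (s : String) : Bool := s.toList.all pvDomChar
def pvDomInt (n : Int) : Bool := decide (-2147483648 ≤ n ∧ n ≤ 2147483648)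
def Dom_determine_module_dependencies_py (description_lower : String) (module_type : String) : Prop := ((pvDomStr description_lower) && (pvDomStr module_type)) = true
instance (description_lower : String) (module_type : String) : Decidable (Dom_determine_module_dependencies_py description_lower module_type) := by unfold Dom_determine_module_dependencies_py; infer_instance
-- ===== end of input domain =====

-- B replaces A's nine inline branches by one fold over a declarative rule table (objective: simpler).

-- ===== PORT A =====
def determine_module_dependencies_py (description_lower : String) (module_type : String) : List String :=
  let dependencies := ["Dependencies"]
  let dependencies :=
    if ["platform", "feature"].contains module_type then
      let dependencies :=
        if ["api", "network", "request"].any (fun w => PySem.Str.isIn w description_lower) then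
          dependencies ++ ["TMAPIClientApi"] else dependencies
      let dependencies :=
        if ["session", "auth", "login"].any (fun w => PySem.Str.isIn w description_lower) then
          dependencies ++ ["SessionManagerApi"] else dependencies
      let dependencies :=
        if ["log", "debug", "error"].any (fun w => PySem.Str.isIn w description_lower) then
          dependencies ++ ["TMLoggerApi"] else dependencies
      let dependencies :=
        if ["analytics", "tracking"].any (fun w => PySem.Str.isIn w description_lower) then
          dependencies ++ ["TMAnalyticsApi"] else dependencies
      let dependencies :=
        if ["config", "feature"].any (fun w => PySem.Str.isIn w description_lower) then
          dependencies ++ ["TMConfigApi"] else dependencies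
      dependencies
    else dependencies
  let dependencies :=
    if ["ui", "view", "swiftui"].any (fun w => PySem.Str.isIn w description_lower) then
      dependencies ++ ["Tangram2", "SwiftUINavigation"] else dependencies
  let dependencies :=
    if ["state", "async", "reactive"].any (fun w => PySem.Str.isIn w description_lower) then
      dependencies ++ ["Chassis", "Combine"] else dependencies
  if module_type == "test" then dependencies ++ ["Quick", "Nimble", "XCTest"] else dependencies

-- ===== PORT B =====
-- the rule table of Source B: (keywords or none, deps to append, allowed module types or none)
def depRules : List (Option (List String) × List String × Option (List String)) :=
  [ (some ["api", "network", "request"], ["TMAPIClientApi"], some ["platform", "feature"]),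
    (some ["session", "auth", "login"], ["SessionManagerApi"], some ["platform", "feature"]),
    (some ["log", "debug", "error"], ["TMLoggerApi"], some ["platform", "feature"]),
    (some ["analytics", "tracking"], ["TMAnalyticsApi"], some ["platform", "feature"]),
    (some ["config", "feature"], ["TMConfigApi"], some ["platform", "feature"]),
    (some ["ui", "view", "swiftui"], ["Tangram2", "SwiftUINavigation"], none),
    (some ["state", "async", "reactive"], ["Chassis", "Combine"], none),
    (none, ["Quick", "Nimble", "XCTest"], some ["test"]) ]

def determine_module_dependencies_py_alt (description_lower : String) (module_type : String) : List String :=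
  depRules.foldl
    (fun deps r =>
      if (match r.2.2 with
          | none => true
          | some ts => ts.contains module_type)
         && (match r.1 with
             | none => true
             | some ws => ws.any (fun w => PySem.Str.isIn w description_lower)) then
        deps ++ r.2.1
      else deps)
    ["Dependencies"]

-- ===== PRECONDITION & SPEC =====
def Spec_determine_module_dependencies_py (description_lower : String) (module_type : String) (out : List String) : Prop := out = determine_module_dependencies_py_alt description_lower module_type
instance (description_lower : String) (module_type : String) (out : List String) : Decidable (Spec_determine_module_dependencies_py description_lower module_type out) := by unfold Spec_determine_module_dependencies_py; infer_instance

-- ===== CLAIM (what is proved, stated in full; the proofs are below) =====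
def Claim_equal_determine_module_dependencies_py : Prop := ∀ (description_lower : String) (module_type : String), Dom_determine_module_dependencies_py description_lower module_type → Spec_determine_module_dependencies_py description_lower module_type (determine_module_dependencies_py description_lower module_type)

-- ===== LEMMAS AND PROOFS =====
-- "test" is neither "platform" nor "feature", so A's test-branch and B's last rule never
-- interact with the platform group; everything else is a case split on the shared conditions.
set_option maxRecDepth 8000 in
theorem determine_module_dependencies_eq (description_lower : String) (module_type : String) :
    determine_module_dependencies_py description_lower module_type
      = determine_module_dependencies_py_alt description_lower module_type := by
  simp only [determine_module_dependencies_py, determine_module_dependencies_py_alt, depRules,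
    List.foldl]
  cases hg : ["platform", "feature"].contains module_type
  · simp [List.contains_cons, List.contains_nil]
  · simp [hg]

-- ===== VERDICT (by name: the statement is the Claim_ definition above) =====
theorem determine_module_dependencies_py_spec : Claim_equal_determine_module_dependencies_py := by
  intro d m _
  unfold Spec_determine_module_dependencies_py
  exact determine_module_dependencies_eq d m
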